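-- pv_equiv track=rewrite | github.com/suhyeon17/CodingTest | 프로그래머스/unrated/155652. 둘만의 암호/둘만의 암호.py | solution
-- ===== SOURCE A (Python) =====
-- def solution(s, skip, index):
--     answer = ''
--     for alpha in s:
--         ascii1 = ord(alpha)
--         cnt = 0
--         while cnt != index :
--             if ascii1 + 1 > 122:
--                 ascii1 = 96
--             if chr(ascii1 + 1) in skip:
--                 ascii1 += 1
--             else:
--                 ascii1 += 1
--                 cnt += 1
--
--         answer += chr(ascii1)
--
--     return answer
-- ===== SOURCE B (Python) =====
-- def solution(s, skip, index):
--     banned = set(map(ord, skip))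
--     cycle = [d for d in range(97, 123) if d not in banned]
--     out = []
--     for ch in s:
--         if index <= 0:
--             out.append(ch)
--             continue
--         c = ord(ch)
--         prefix = [d for d in range(c + 1, 123) if d not in banned] if c < 122 else []
--         k = index - len(prefix)
--         if k <= 0:
--             out.append(chr(prefix[index - 1]))
--         else:
--             out.append(chr(cycle[(k - 1) % len(cycle)]))
--     return ''.join(out)
-- ===== Notes on version B (the rewrite author's own statement) =====
-- stated objective: faster
-- what changed: A advances each character by stepping one code at a time `index` times (skipping skip-characters); B precomputes the set of banned codes and the non-skip letter cycle once and answers each character by one modular index into that cycle (after its short pre-cycle prefix), removing the per-character O(index) walk.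
import Mathlib
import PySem

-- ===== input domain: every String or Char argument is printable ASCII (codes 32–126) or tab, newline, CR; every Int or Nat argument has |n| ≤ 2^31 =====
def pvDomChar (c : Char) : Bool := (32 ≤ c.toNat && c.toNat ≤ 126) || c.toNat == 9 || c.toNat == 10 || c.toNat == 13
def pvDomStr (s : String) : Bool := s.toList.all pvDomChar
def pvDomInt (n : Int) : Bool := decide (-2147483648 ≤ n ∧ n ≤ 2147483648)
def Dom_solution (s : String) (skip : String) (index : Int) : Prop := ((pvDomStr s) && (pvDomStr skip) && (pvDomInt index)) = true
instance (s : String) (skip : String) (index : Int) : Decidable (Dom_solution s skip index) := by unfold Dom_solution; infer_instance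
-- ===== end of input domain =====

-- B replaces A's per-character skip-walk (index counted steps each) by one modular index
-- into the precomputed non-skip letter cycle (objective: faster in `index`).

-- ===== PORT A =====
-- `chr(x) in skip` for a single character is exactly membership of that character in skip
def chIn (skip : String) (d : Int) : Bool := skip.toList.contains (Char.ofNat d.toNat)

-- A's inner `while cnt != index` loop, step for step; the fuel argument only makes the
-- recursion total and is proved sufficient on every input admitted by Pre_solution
def solutionLoop (skip : String) (index : Int) : Nat → Int → Int → Int
  | 0, ascii1, _ => ascii1
  | fuel+1, ascii1, cnt =>
    if cnt = index then ascii1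
    else
      let a1 : Int := if ascii1 + 1 > 122 then 96 else ascii1
      if chIn skip (a1 + 1) then solutionLoop skip index fuel (a1 + 1) cnt
      else solutionLoop skip index fuel (a1 + 1) (cnt + 1)

def solution (s : String) (skip : String) (index : Int) : String :=
  String.ofList (s.toList.foldl
    (fun answer alpha =>
      answer ++ [Char.ofNat (solutionLoop skip index (200 + 200 * index.toNat) (alpha.toNat : Int) 0).toNat])
    [])

-- ===== PORT B =====
def solution_alt (s : String) (skip : String) (index : Int) : String :=
  let banned : PySem.Set Int := PySem.Set.ofList (skip.toList.map (fun ch => (ch.toNat : Int)))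
  let cycle : List Int := (PySem.List.pyRange 97 123 1).filter (fun d => !(PySem.Set.contains banned d))
  let out : List Char := s.toList.foldl
    (fun out ch =>
      if index ≤ 0 then out ++ [ch]
      else
        let c : Int := (ch.toNat : Int)
        let pfx : List Int :=
          if c < 122 then (PySem.List.pyRange (c + 1) 123 1).filter (fun d => !(PySem.Set.contains banned d)) else []
        let k : Int := index - (pfx.length : Int)
        if k ≤ 0 then out ++ [Char.ofNat (PySem.List.pyGetD pfx (index - 1) 0).toNat]
        else out ++ [Char.ofNat (PySem.List.pyGetD cycle (PySem.Int.mod (k - 1) (cycle.length : Int)) 0).toNat])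
    []
  String.ofList out

-- ===== PRECONDITION & SPEC =====
-- Pre_ excludes exactly the inputs on which A's `while` loop never terminates (so A returns
-- no value): a nonempty s with a negative index, or with a positive index when every letter
-- a..z is in skip and some character of s has fewer than `index` non-skip characters in its
-- pre-cycle stretch (codes ≤ 96).
def Pre_solution (s : String) (skip : String) (index : Int) : Prop :=
  s.toList = [] ∨ 0 ≤ index ∧ (index = 0 ∨
    (∃ d ∈ PySem.List.pyRange 97 123 1, Char.ofNat d.toNat ∉ skip.toList) ∨
    (∀ ch ∈ s.toList, index ≤
      (((PySem.List.pyRange ((ch.toNat : Int) + 1) 97 1).filter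
          (fun d => !(skip.toList.contains (Char.ofNat d.toNat)))).length : Int)))
instance (s : String) (skip : String) (index : Int) : Decidable (Pre_solution s skip index) := by
  unfold Pre_solution; infer_instance

def pvWitness_solution : String × String × Int := ("aqz", "bcd", 5)

def Spec_solution (s : String) (skip : String) (index : Int) (out : String) : Prop := out = solution_alt s skip index
instance (s : String) (skip : String) (index : Int) (out : String) : Decidable (Spec_solution s skip index out) := by unfold Spec_solution; infer_instance

-- ===== CLAIM (what is proved, stated in full; the proofs are below) =====
def Claim_equal_solution : Prop := ∀ (s : String) (skip : String) (index : Int), Dom_solution s skip index → Pre_solution s skip index → Spec_solution s skip index (solution s skip index)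

-- ===== LEMMAS AND PROOFS =====

def PfL (skip : String) (x : Int) : List Int :=
  (PySem.List.pyRange (x + 1) 123 1).filter (fun d => !chIn skip d)

def cyc (skip : String) : List Int := PfL skip 96

def walkG (skip : String) (k : Nat) (x : Int) : Int :=
  if k = 0 then x
  else if k ≤ (PfL skip x).length then (PfL skip x).getD (k - 1) 0
  else (cyc skip).getD ((k - (PfL skip x).length - 1) % (cyc skip).length) 0

theorem PfL_head_mem {skip : String} {x d : Int} {rest : List Int}
    (h : PfL skip x = d :: rest) : x + 1 ≤ d ∧ d ≤ 122 ∧ chIn skip d = false := by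
  have hd : d ∈ PfL skip x := by rw [h]; exact List.mem_cons_self
  unfold PfL at hd
  have h1 := List.mem_of_mem_filter hd
  have h2 := List.of_mem_filter hd
  rw [PySem.List.mem_pyRange_one] at h1
  refine ⟨by omega, by omega, by simpa using h2⟩

theorem PfL_tail {skip : String} {x d : Int} {rest : List Int}
    (h : PfL skip x = d :: rest) : PfL skip d = rest := by
  obtain ⟨hxd, hd122, hnb⟩ := PfL_head_mem h
  have hsplit : PySem.List.pyRange (x+1) 123 1
      = PySem.List.pyRange (x+1) d 1 ++ (d :: PySem.List.pyRange (d+1) 123 1) := by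
    rw [PySem.List.pyRange_one_append (x+1) d 123 (by omega) (by omega),
        PySem.List.pyRange_one_cons (a := d) (b := 123) (by omega)]
  unfold PfL at h ⊢
  rw [hsplit, List.filter_append] at h
  have hfst : (PySem.List.pyRange (x+1) d 1).filter (fun e => !chIn skip e) = [] := by
    cases hfe : (PySem.List.pyRange (x+1) d 1).filter (fun e => !chIn skip e) with
    | nil => rfl
    | cons e t =>
      exfalso
      rw [hfe] at h
      have he : e ∈ PySem.List.pyRange (x+1) d 1 :=
        List.mem_of_mem_filter (by rw [hfe]; exact List.mem_cons_self)
      rw [PySem.List.mem_pyRange_one] at he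
      have : e = d := by simpa using congrArg (fun l => l.head? ) h
      omega
  rw [hfst, List.nil_append, List.filter_cons, hnb] at h
  simpa using h

theorem PfL_drop_banned {skip : String} {x : Int} (hx : x + 1 < 123) (hb : chIn skip (x+1) = true) :
    PfL skip x = PfL skip (x+1) := by
  unfold PfL
  rw [PySem.List.pyRange_one_cons (by omega), List.filter_cons, hb]
  simp

theorem run_to_head {skip : String} {index : Int} :
    ∀ (fuel : Nat) (x d : Int) (rest : List Int) (cnt : Int),
      PfL skip x = d :: rest → cnt ≠ index → (d - x).toNat ≤ fuel →
      solutionLoop skip index fuel x cnt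
        = solutionLoop skip index (fuel - (d - x).toNat) d (cnt + 1) := by
  intro fuel
  induction fuel with
  | zero =>
    intro x d rest cnt h hc hf
    obtain ⟨h1, h2, h3⟩ := PfL_head_mem h
    omega
  | succ f ih =>
    intro x d rest cnt h hc hf
    obtain ⟨h1, h2, h3⟩ := PfL_head_mem h
    have hx1 : ¬ (x + 1 > 122) := by omega
    by_cases he : x + 1 = d
    · subst he
      simp only [solutionLoop, if_neg hc, hx1, if_false, h3]
      simp
    · -- x+1 < d, so x+1 is banned and PfL (x+1) = d :: rest
      have hb : chIn skip (x+1) = true := by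
        by_contra hnb
        have : PfL skip x = (x+1) :: PfL skip (x+1) := by
          unfold PfL
          rw [PySem.List.pyRange_one_cons (by omega), List.filter_cons]
          simp [Bool.not_eq_true] at hnb
          simp [hnb]
        rw [h] at this
        have := congrArg (fun l => l.head?) this
        simp at this
        omega
      have hstep : PfL skip (x+1) = d :: rest := by
        rw [← PfL_drop_banned (by omega) hb, h]
      simp only [solutionLoop, if_neg hc, hx1, if_false, hb, if_true]
      rw [ih (x+1) d rest cnt hstep hc (by omega)]
      congr 1
      omega

theorem run_prefix {skip : String} {index : Int} :
    ∀ (fuel : Nat) (x cnt : Int),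
      PfL skip x = [] → x ≤ 122 → cnt ≠ index → (122 - x).toNat ≤ fuel →
      solutionLoop skip index fuel x cnt
        = solutionLoop skip index (fuel - (122 - x).toNat) 122 cnt := by
  intro fuel
  induction fuel with
  | zero =>
    intro x cnt h hx hc hf
    have : x = 122 := by omega
    subst this
    simp
  | succ f ih =>
    intro x cnt h hx hc hf
    by_cases he : x = 122
    · subst he; simp
    · have hx1 : ¬ (x + 1 > 122) := by omega
      have hb : chIn skip (x+1) = true := by
        have : ∀ a ∈ PySem.List.pyRange (x+1) 123 1, ¬ (!chIn skip a) = true := by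
          rw [← List.filter_eq_nil_iff]; exact h
        have := this (x+1) (by rw [PySem.List.mem_pyRange_one]; omega)
        simpa using this
      have hnext : PfL skip (x+1) = [] := by
        rw [← PfL_drop_banned (by omega) hb]; exact h
      simp only [solutionLoop, if_neg hc, hx1, if_false, hb, if_true]
      rw [ih (x+1) cnt hnext (by omega) hc (by omega)]
      congr 1
      omega

theorem wrap_96 {skip : String} {index : Int} {fuel : Nat} {x cnt : Int}
    (hx : 122 ≤ x) (hc : cnt ≠ index) :
    solutionLoop skip index (fuel + 1) x cnt = solutionLoop skip index (fuel + 1) 96 cnt := by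
  have h1 : x + 1 > 122 := by omega
  have h2 : ¬ ((96:Int) + 1 > 122) := by omega
  simp only [solutionLoop, if_neg hc, h1, if_true, h2, if_false]

theorem walkG_succ_cons {skip : String} {x d : Int} {rest : List Int} (k : Nat)
    (h : PfL skip x = d :: rest) : walkG skip (k + 1) x = walkG skip k d := by
  have ht : PfL skip d = rest := PfL_tail h
  unfold walkG
  rw [h, ht]
  cases k with
  | zero => simp
  | succ m =>
    simp only [Nat.succ_ne_zero, if_false, List.length_cons]
    by_cases hle : m + 1 ≤ rest.length
    · rw [if_pos (by omega), if_pos hle]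
      simp
    · rw [if_neg (by omega), if_neg hle]
      congr 2
      omega

theorem walkG_succ_nil {skip : String} {x d : Int} {rest : List Int} (k : Nat)
    (h : PfL skip x = []) (hc : cyc skip = d :: rest) :
    walkG skip (k + 1) x = walkG skip k d := by
  have ht : PfL skip d = rest := PfL_tail (by rw [← hc]; rfl)
  unfold walkG
  rw [h, ht, hc]
  simp only [List.length_nil]
  rw [if_neg (Nat.succ_ne_zero k), if_neg (by simp)]
  simp only [Nat.sub_zero, Nat.add_sub_cancel]
  cases k with
  | zero => simp
  | succ m =>
    rw [if_neg (Nat.succ_ne_zero m)]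
    by_cases hle : m + 1 ≤ rest.length
    · rw [if_pos hle, Nat.mod_eq_of_lt (by simp; omega)]
      simp
    · rw [if_neg hle, List.length_cons]
      have hmod : (m + 1) % (rest.length + 1) = (m + 1 - rest.length - 1) % (rest.length + 1) := by
        conv_lhs => rw [show m + 1 = (m + 1 - rest.length - 1) + (rest.length + 1) from by omega]
        rw [Nat.add_mod_right]
      rw [hmod]

theorem loop_eq {skip : String} {index : Int} :
    ∀ (k : Nat) (fuel : Nat) (x cnt : Int),
      x ≤ 126 → cnt + (k : Int) = index →
      (cyc skip ≠ [] ∨ k ≤ (PfL skip x).length) →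
      160 * k + (123 - x).toNat + 5 ≤ fuel →
      solutionLoop skip index fuel x cnt = walkG skip k x := by
  intro k
  induction k with
  | zero =>
    intro fuel x cnt hx hcnt hL hf
    obtain ⟨f, rfl⟩ : ∃ f, fuel = f + 1 := ⟨fuel - 1, by omega⟩
    have : cnt = index := by omega
    simp [solutionLoop, this, walkG]
  | succ k ih =>
    intro fuel x cnt hx hcnt hL hf
    have hc : cnt ≠ index := by omega
    cases hp : PfL skip x with
    | cons d rest =>
      obtain ⟨hd1, hd2, hd3⟩ := PfL_head_mem hp
      rw [run_to_head fuel x d rest cnt hp hc (by omega)]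
      rw [ih _ d (cnt + 1) (by omega) (by omega)
        (by rcases hL with h | h
            · exact Or.inl h
            · right; rw [PfL_tail hp]; rw [hp] at h; simp at h; omega)
        (by omega)]
      exact (walkG_succ_cons k hp).symm
    | nil =>
      have hcy : cyc skip ≠ [] := by
        rcases hL with h | h
        · exact h
        · rw [hp] at h; simp at h
      obtain ⟨d, rest, hcyc⟩ : ∃ d rest, cyc skip = d :: rest := by
        cases hcc : cyc skip with
        | nil => exact absurd hcc hcy
        | cons a b => exact ⟨a, b, rfl⟩
      obtain ⟨hd1, hd2, hd3⟩ := PfL_head_mem (show PfL skip 96 = d :: rest from hcyc)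
      by_cases hxw : x < 122
      · rw [run_prefix fuel x cnt hp (by omega) hc (by omega)]
        have h122 : PfL skip (122 : Int) = [] := by
          unfold PfL
          rw [PySem.List.pyRange_one_eq_nil (by omega)]
          rfl
        obtain ⟨f2, hf2⟩ : ∃ f2, fuel - (122 - x).toNat = f2 + 1 := ⟨fuel - (122 - x).toNat - 1, by omega⟩
        rw [hf2, wrap_96 (by omega) hc, ← hf2]
        rw [run_to_head _ 96 d rest cnt hcyc hc (by omega)]
        rw [ih _ d (cnt + 1) (by omega) (by omega) (Or.inl hcy) (by omega)]
        exact (walkG_succ_nil k hp hcyc).symm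
      · obtain ⟨f2, hf2⟩ : ∃ f2, fuel = f2 + 1 := ⟨fuel - 1, by omega⟩
        rw [hf2, wrap_96 (by omega) hc, ← hf2]
        rw [run_to_head _ 96 d rest cnt hcyc hc (by omega)]
        rw [ih _ d (cnt + 1) (by omega) (by omega) (Or.inl hcy) (by omega)]
        exact (walkG_succ_nil k hp hcyc).symm

theorem char_ofNat_int_eq {d : Int} (h0 : 0 ≤ d) (h1 : d ≤ 122) (ch : Char) :
    ((ch.toNat : Int) = d) ↔ ch = Char.ofNat d.toNat := by
  constructor
  · intro h
    have : ch.toNat = d.toNat := by omega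
    rw [← this, Char.ofNat_toNat]
  · intro h
    have hval : d.toNat.isValidChar := Or.inl (by omega)
    subst h
    simp [Char.ofNat, hval, Char.ofNatAux, Char.toNat]
    omega

theorem contains_ord_set {skip : String} {d : Int} (h0 : 0 ≤ d) (h1 : d ≤ 122) :
    PySem.Set.contains (PySem.Set.ofList (skip.toList.map (fun ch => (ch.toNat : Int)))) d = chIn skip d := by
  unfold chIn
  by_cases hm : Char.ofNat d.toNat ∈ skip.toList
  · have h2 : d ∈ PySem.Set.ofList (skip.toList.map (fun ch => (ch.toNat : Int))) := by
      rw [PySem.Set.mem_ofList, List.mem_map]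
      exact ⟨Char.ofNat d.toNat, hm, ((char_ofNat_int_eq h0 h1 _).mpr rfl)⟩
    simp [PySem.Set.contains, h2, hm]
  · have h2 : d ∉ PySem.Set.ofList (skip.toList.map (fun ch => (ch.toNat : Int))) := by
      rw [PySem.Set.mem_ofList, List.mem_map]
      rintro ⟨ch, hch, heq⟩
      exact hm (((char_ofNat_int_eq h0 h1 ch).mp heq) ▸ hch)
    simp [PySem.Set.contains, h2, hm]

def bannedOf (skip : String) : PySem.Set Int :=
  PySem.Set.ofList (skip.toList.map (fun ch => (ch.toNat : Int)))

def cycleOf (skip : String) : List Int :=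
  (PySem.List.pyRange 97 123 1).filter (fun d => !(PySem.Set.contains (bannedOf skip) d))

def pfxOf (skip : String) (c : Int) : List Int :=
  if c < 122 then (PySem.List.pyRange (c + 1) 123 1).filter (fun d => !(PySem.Set.contains (bannedOf skip) d)) else []

def altChar (skip : String) (index : Int) (ch : Char) : Char :=
  if index ≤ 0 then ch
  else
    let c : Int := (ch.toNat : Int)
    let pfx := pfxOf skip c
    let k : Int := index - (pfx.length : Int)
    if k ≤ 0 then Char.ofNat (PySem.List.pyGetD pfx (index - 1) 0).toNat
    else Char.ofNat (PySem.List.pyGetD (cycleOf skip)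
      (PySem.Int.mod (k - 1) ((cycleOf skip).length : Int)) 0).toNat

theorem pfxOf_eq_PfL {skip : String} (c : Int) (h0 : 0 ≤ c) : pfxOf skip c = PfL skip c := by
  unfold pfxOf
  by_cases hc : c < 122
  · rw [if_pos hc]
    unfold PfL
    apply List.filter_congr
    intro d hd
    rw [PySem.List.mem_pyRange_one] at hd
    unfold bannedOf
    rw [contains_ord_set (by omega) (by omega)]
  · rw [if_neg hc]
    unfold PfL
    rw [PySem.List.pyRange_one_eq_nil (by omega)]
    rfl

theorem cycleOf_eq_cyc {skip : String} : cycleOf skip = cyc skip := by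
  unfold cycleOf cyc PfL
  apply List.filter_congr
  intro d hd
  rw [PySem.List.mem_pyRange_one] at hd
  unfold bannedOf
  rw [contains_ord_set (by omega) (by omega)]

theorem char_step {skip : String} {index : Int} (hidx0 : 0 ≤ index) (ch : Char)
    (hch : (ch.toNat : Int) ≤ 126)
    (hL : 0 < index → (cyc skip ≠ [] ∨ index.toNat ≤ (PfL skip (ch.toNat : Int)).length)) :
    Char.ofNat (solutionLoop skip index (200 + 200 * index.toNat) (ch.toNat : Int) 0).toNat
      = altChar skip index ch := by
  by_cases h0 : index ≤ 0
  · have hz : index = 0 := le_antisymm h0 hidx0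
    subst hz
    rw [loop_eq 0 _ _ _ (by omega) (by simp) (Or.inr (by omega)) (by simp; omega)]
    unfold altChar walkG
    simp [Char.ofNat_toNat]
  · have hpos : 0 < index := by omega
    have hc0 : (0:Int) ≤ (ch.toNat : Int) := by positivity
    rw [loop_eq index.toNat _ _ _ (by omega) (by simp [Int.toNat_of_nonneg hidx0])
      (hL hpos) (by omega)]
    unfold altChar
    rw [if_neg h0]
    simp only [pfxOf_eq_PfL (ch.toNat : Int) hc0, cycleOf_eq_cyc]
    unfold walkG
    rw [if_neg (by omega)]
    by_cases hle : index.toNat ≤ (PfL skip (ch.toNat : Int)).length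
    · rw [if_pos hle, if_pos (by omega)]
      have h1 : index - 1 = ((index.toNat - 1 : Nat) : Int) := by omega
      rw [h1, PySem.List.pyGetD_natCast]
    · rw [if_neg hle, if_neg (by omega)]
      have h1 : index - (PfL skip (ch.toNat : Int)).length - 1
          = ((index.toNat - (PfL skip (ch.toNat : Int)).length - 1 : Nat) : Int) := by omega
      rw [h1, PySem.Int.mod_natCast, PySem.List.pyGetD_natCast]

theorem alt_eq_map (s skip : String) (index : Int) :
    solution_alt s skip index = String.ofList (s.toList.map (altChar skip index)) := by
  have h1 : solution_alt s skip index = String.ofList (s.toList.foldl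
      (fun (out : List Char) (ch : Char) =>
        if index ≤ 0 then out ++ [ch]
        else
          let c : Int := (ch.toNat : Int)
          let pfx := pfxOf skip c
          let k : Int := index - (pfx.length : Int)
          if k ≤ 0 then out ++ [Char.ofNat (PySem.List.pyGetD pfx (index - 1) 0).toNat]
          else out ++ [Char.ofNat (PySem.List.pyGetD (cycleOf skip)
            (PySem.Int.mod (k - 1) ((cycleOf skip).length : Int)) 0).toNat]) []) := rfl
  rw [h1]
  have hbody : (fun (out : List Char) (ch : Char) =>
        if index ≤ 0 then out ++ [ch]
        else
          let c : Int := (ch.toNat : Int)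
          let pfx := pfxOf skip c
          let k : Int := index - (pfx.length : Int)
          if k ≤ 0 then out ++ [Char.ofNat (PySem.List.pyGetD pfx (index - 1) 0).toNat]
          else out ++ [Char.ofNat (PySem.List.pyGetD (cycleOf skip)
            (PySem.Int.mod (k - 1) ((cycleOf skip).length : Int)) 0).toNat])
      = fun out ch => out ++ [altChar skip index ch] := by
    funext out ch
    unfold altChar
    by_cases h0 : index ≤ 0
    · simp [h0]
    · simp only [if_neg h0]
      split <;> rfl
  rw [hbody, PySem.List.foldl_append_singleton_eq_map]
  simp

theorem solution_eq_map (s skip : String) (index : Int) :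
    solution s skip index = String.ofList (s.toList.map
      (fun alpha => Char.ofNat (solutionLoop skip index (200 + 200 * index.toNat) (alpha.toNat : Int) 0).toNat)) := by
  unfold solution
  rw [PySem.List.foldl_append_singleton_eq_map]
  simp

theorem solution_spec_main : ∀ (s : String) (skip : String) (index : Int),
    Dom_solution s skip index → Pre_solution s skip index →
    solution s skip index = solution_alt s skip index := by
  intro s skip index hdom hpre
  rcases hpre with hemp | ⟨hidx0, hrest⟩
  · rw [solution_eq_map, alt_eq_map, hemp]; rfl
  rw [solution_eq_map, alt_eq_map]
  congr 1
  apply List.map_congr_left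
  intro ch hch
  have hdomc : (ch.toNat : Int) ≤ 126 := by
    unfold Dom_solution pvDomStr pvDomInt at hdom
    simp [List.all_eq_true] at hdom
    have := hdom.1.1 ch hch
    unfold pvDomChar at this
    simp at this
    omega
  apply char_step hidx0 ch hdomc
  intro hpos
  rcases hrest with hz | hex | hall
  · omega
  · left
    obtain ⟨d, hd, hnm⟩ := hex
    have : d ∈ cyc skip := by
      unfold cyc PfL
      apply List.mem_filter.mpr
      refine ⟨by simpa using hd, ?_⟩
      simp [chIn]
      exact hnm
    exact List.ne_nil_of_mem this
  · right
    have h := hall ch hch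
    have hc96 : (ch.toNat : Int) < 96 := by
      by_contra hge
      rw [PySem.List.pyRange_one_eq_nil (by omega)] at h
      simp at h
      omega
    unfold PfL
    rw [PySem.List.pyRange_one_append ((ch.toNat : Int) + 1) 97 123 (by omega) (by omega),
      List.filter_append, List.length_append]
    have heq : ((PySem.List.pyRange ((ch.toNat : Int) + 1) 97 1).filter
        (fun d => !chIn skip d)).length
        = ((PySem.List.pyRange ((ch.toNat : Int) + 1) 97 1).filter
        (fun d => !(skip.toList.contains (Char.ofNat d.toNat)))).length := rfl
    omega

-- ===== VERDICT (by name: the statement is the Claim_ definition above) =====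
theorem solution_spec : Claim_equal_solution := by
  intro s skip index hdom hpre
  exact solution_spec_main s skip index hdom hpre
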